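-- pv_equiv track=rewrite | github.com/Lynn-Dai/DataExtraction | hiddenAPI.py | process_type_signature
-- ===== SOURCE A (Python) =====
-- def process_type_signature(value):
--     if value == "Z":
--         return "boolean"
--     elif value == "B":
--         return "byte"
--     elif value == "C":
--         return "char"
--     elif value == "S":
--         return "short"
--     elif value == "I":
--         return "int"
--     elif value == "J":
--         return "long"
--     elif value == "F":
--         return "float"
--     elif value == "D":
--         return "double"
--     elif "L" in value:
--         t = value[1:].replace("/", ".").replace("$", ".")
--         if "java" in t:
--             t = t.split(".")
--             t = t[len(t) - 1]
--         return t
--     elif "[" in value: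
--         return "list"+process_type_signature(value[1:])
--     else:
--         return ""
-- ===== SOURCE B (Python) =====
-- # B: table-driven primitives + a single hoisted object branch + an iterative
-- # array loop (stripping a leading character cannot introduce an object marker,
-- # so the object branch needs to be decided only once, up front).
-- _PRIM = {"Z": "boolean", "B": "byte", "C": "char", "S": "short",
--          "I": "int", "J": "long", "F": "float", "D": "double"}
--
-- def process_type_signature(value):
--     if value in _PRIM:
--         return _PRIM[value]
--     if "L" in value:
--         t = value[1:].replace("/", ".").replace("$", ".")
--         if "java" in t:
--             t = t.split(".")[-1]
--         return t
--     prefix = ""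
--     while "[" in value:
--         prefix += "list"
--         value = value[1:]
--         if value in _PRIM:
--             return prefix + _PRIM[value]
--     return prefix
-- ===== Notes on version B (the rewrite author's own statement) =====
-- stated objective: alternative
-- what changed: Replaces A's recursive if-chain (re-tested at every array level) with a primitive lookup table, a single hoisted 'L' object branch, and an iterative while-loop that accumulates the 'list' prefix.
import Mathlib
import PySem

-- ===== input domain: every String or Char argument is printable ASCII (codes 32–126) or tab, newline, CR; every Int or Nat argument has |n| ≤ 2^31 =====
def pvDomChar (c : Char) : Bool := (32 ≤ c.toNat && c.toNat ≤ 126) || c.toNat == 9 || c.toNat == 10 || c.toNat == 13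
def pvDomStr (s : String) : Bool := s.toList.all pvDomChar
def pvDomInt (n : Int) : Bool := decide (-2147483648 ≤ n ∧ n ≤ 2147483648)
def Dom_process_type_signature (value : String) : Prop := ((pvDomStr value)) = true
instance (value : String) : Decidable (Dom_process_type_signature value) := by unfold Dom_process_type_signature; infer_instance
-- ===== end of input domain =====

-- B replaces A's recursive branch chain by a primitive table + a hoisted object branch + an iterative array loop; same values everywhere (alternative decomposition).

-- used by both ports' termination proofs (cited by name in decreasing_by)
theorem pvDropLt (l : List Char) (h : PySem.Chars.isIn ['['] l = true) :
    (l.drop 1).length < l.length := by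
  have := (PySem.Chars.isIn_iff_infix _ _).mp h
  have hne : l ≠ [] := by rintro rfl; simpa using this.length_le
  have : 0 < l.length := List.length_pos_iff.mpr hne
  simp only [List.length_drop]; omega

-- ===== PORT A =====
def process_type_signature_core (l : List Char) : List Char :=
  if l = ['Z'] then "boolean".toList
  else if l = ['B'] then "byte".toList
  else if l = ['C'] then "char".toList
  else if l = ['S'] then "short".toList
  else if l = ['I'] then "int".toList
  else if l = ['J'] then "long".toList
  else if l = ['F'] then "float".toList
  else if l = ['D'] then "double".toList
  else if PySem.Chars.isIn ['L'] l then
    let t := PySem.Chars.replace (PySem.Chars.replace (l.drop 1) ['/'] ['.']) ['$'] ['.']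
    if PySem.Chars.isIn "java".toList t = true then
      let parts := PySem.Chars.splitOn t ['.']
      -- t[len(t)-1]; split never returns an empty list, so the getD default is unreachable
      (PySem.List.pyGet? parts ((parts.length : Int) - 1)).getD []
    else t
  else if h : PySem.Chars.isIn ['['] l then
    "list".toList ++ process_type_signature_core (l.drop 1)
  else []
termination_by l.length
decreasing_by exact pvDropLt l h

def process_type_signature (value : String) : String :=
  String.ofList (process_type_signature_core value.toList)

-- ===== PORT B =====
-- the _PRIM dict of Source B
def pvPrim : PySem.Dict (List Char) (List Char) :=
  PySem.Dict.ofList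
    [(['Z'], "boolean".toList), (['B'], "byte".toList), (['C'], "char".toList),
     (['S'], "short".toList), (['I'], "int".toList), (['J'], "long".toList),
     (['F'], "float".toList), (['D'], "double".toList)]

-- the while-loop of Source B: prefix accumulator
def pvAltLoop (pre l : List Char) : List Char :=
  if h : PySem.Chars.isIn ['['] l then
    let pre' := pre ++ "list".toList
    let l' := l.drop 1
    match pvPrim.get? l' with
    | some s => pre' ++ s
    | none => pvAltLoop pre' l'
  else pre
termination_by l.length
decreasing_by exact pvDropLt l h

def process_type_signature_alt_core (l : List Char) : List Char :=
  match pvPrim.get? l with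
  | some s => s
  | none =>
    if PySem.Chars.isIn ['L'] l then
      let t := PySem.Chars.replace (PySem.Chars.replace (l.drop 1) ['/'] ['.']) ['$'] ['.']
      if PySem.Chars.isIn "java".toList t = true then
        -- t.split(".")[-1]; split never returns an empty list, so the getD default is unreachable
        (PySem.List.pyGet? (PySem.Chars.splitOn t ['.']) (-1)).getD []
      else t
    else pvAltLoop [] l

def process_type_signature_alt (value : String) : String :=
  String.ofList (process_type_signature_alt_core value.toList)

-- ===== PRECONDITION & SPEC =====
def Spec_process_type_signature (value : String) (out : String) : Prop := out = process_type_signature_alt value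
instance (value : String) (out : String) : Decidable (Spec_process_type_signature value out) := by unfold Spec_process_type_signature; infer_instance

-- ===== CLAIM (what is proved, stated in full; the proofs are below) =====
def Claim_equal_process_type_signature : Prop := ∀ (value : String), Dom_process_type_signature value → Spec_process_type_signature value (process_type_signature value)

-- ===== LEMMAS AND PROOFS =====

theorem pvPrim_spec (l : List Char) :
    pvPrim.get? l =
      if l = ['Z'] then some "boolean".toList
      else if l = ['B'] then some "byte".toList
      else if l = ['C'] then some "char".toList
      else if l = ['S'] then some "short".toList
      else if l = ['I'] then some "int".toList
      else if l = ['J'] then some "long".toList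
      else if l = ['F'] then some "float".toList
      else if l = ['D'] then some "double".toList
      else none := by
  have h : pvPrim = PySem.Dict.mk
      [(['Z'], "boolean".toList), (['B'], "byte".toList), (['C'], "char".toList),
       (['S'], "short".toList), (['I'], "int".toList), (['J'], "long".toList),
       (['F'], "float".toList), (['D'], "double".toList)] := by decide
  rw [h]
  by_cases hZ : l = ['Z']
  · subst hZ; simp [PySem.Dict.get?_mk_cons]
  by_cases hB : l = ['B']
  · subst hB; simp [PySem.Dict.get?_mk_cons]
  by_cases hC : l = ['C']
  · subst hC; simp [PySem.Dict.get?_mk_cons]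
  by_cases hS : l = ['S']
  · subst hS; simp [PySem.Dict.get?_mk_cons]
  by_cases hI : l = ['I']
  · subst hI; simp [PySem.Dict.get?_mk_cons]
  by_cases hJ : l = ['J']
  · subst hJ; simp [PySem.Dict.get?_mk_cons]
  by_cases hF : l = ['F']
  · subst hF; simp [PySem.Dict.get?_mk_cons]
  by_cases hD : l = ['D']
  · subst hD; simp [PySem.Dict.get?_mk_cons]
  · simp [hZ, hB, hC, hS, hI, hJ, hF, hD,
      Ne.symm hZ, Ne.symm hB, Ne.symm hC, Ne.symm hS,
      Ne.symm hI, Ne.symm hJ, Ne.symm hF, Ne.symm hD, PySem.Dict.get?]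

-- dropping a character never introduces an object-marker character
theorem pvNoL_drop (l : List Char) (h : PySem.Chars.isIn ['L'] l = false) :
    PySem.Chars.isIn ['L'] (l.drop 1) = false := by
  rw [PySem.Chars.isIn_eq_false_iff] at h ⊢
  intro hinf
  exact h (hinf.trans (List.drop_suffix 1 l).isInfix)

-- last-element access: parts[-1] = parts[len(parts)-1]
theorem pvLast_eq (parts : List (List Char)) :
    PySem.List.pyGet? parts (-1) = PySem.List.pyGet? parts ((parts.length : Int) - 1) := by
  cases parts with
  | nil => simp [PySem.List.pyGet?]
  | cons a t =>
    simp [PySem.List.pyGet?, PySem.List.pyIdx?]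

theorem pvPrim_core (l s : List Char) (h : pvPrim.get? l = some s) :
    process_type_signature_core l = s := by
  rw [pvPrim_spec] at h
  split_ifs at h with h1 h2 h3 h4 h5 h6 h7 h8 <;>
    simp_all [process_type_signature_core]

-- with primitives and the object branch ruled out, A's chain collapses to the array/empty step
theorem pvCore_step (l : List Char)
    (hL : PySem.Chars.isIn ['L'] l = false) (hp : pvPrim.get? l = none) :
    process_type_signature_core l =
      if PySem.Chars.isIn ['['] l then "list".toList ++ process_type_signature_core (l.drop 1)
      else [] := by
  rw [pvPrim_spec] at hp
  split_ifs at hp with h1 h2 h3 h4 h5 h6 h7 h8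
  rw [process_type_signature_core]
  simp only [h1, h2, h3, h4, h5, h6, h7, h8, if_false, hL, Bool.false_eq_true]
  rfl

theorem pvLoop_eq (l : List Char) (pre : List Char)
    (hL : PySem.Chars.isIn ['L'] l = false) (hp : pvPrim.get? l = none) :
    pvAltLoop pre l = pre ++ process_type_signature_core l := by
  rw [pvCore_step l hL hp, pvAltLoop]
  by_cases hb : PySem.Chars.isIn ['['] l = true
  · simp only [hb, dif_pos, if_pos]
    have hL' := pvNoL_drop l hL
    cases hq : pvPrim.get? (l.drop 1) with
    | some s =>
      rw [List.drop_one] at hq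
      simp [pvPrim_core _ _ hq, List.append_assoc]
    | none =>
      have := pvLoop_eq (l.drop 1) (pre ++ "list".toList) hL' hq
      rw [List.drop_one] at this
      simp [List.append_assoc] at this
      simp [this]
  · simp [hb]
termination_by l.length
decreasing_by exact pvDropLt l hb

theorem pvCore_eq (l : List Char) :
    process_type_signature_core l = process_type_signature_alt_core l := by
  unfold process_type_signature_alt_core
  cases hq : pvPrim.get? l with
  | some s => simp [pvPrim_core _ _ hq]
  | none =>
    by_cases hL : PySem.Chars.isIn ['L'] l = true
    · rw [pvPrim_spec] at hq
      split_ifs at hq with h1 h2 h3 h4 h5 h6 h7 h8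
      rw [process_type_signature_core]
      simp only [h1, h2, h3, h4, h5, h6, h7, h8, if_false, hL, if_pos, pvLast_eq]
    · have hL' : PySem.Chars.isIn ['L'] l = false := by
        simpa using hL
      simp only [hL', Bool.false_eq_true, if_false]
      rw [pvLoop_eq l [] hL' hq, List.nil_append]

-- ===== VERDICT (by name: the statement is the Claim_ definition above) =====
theorem process_type_signature_spec : Claim_equal_process_type_signature := by
  intro value _
  unfold Spec_process_type_signature process_type_signature process_type_signature_alt
  exact congrArg String.ofList (pvCore_eq value.toList)
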